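-- pv_equiv track=rewrite | github.com/leytwt/cntrlwinx | backend/llm_service.py | get_fallback_slides
-- ===== SOURCE A (Python) =====
-- def get_fallback_slides(prompt: str, slides_count: int) -> list:
--     """
--     Fallback если LLM недоступен
--     """
--
--     templates = [
--         {
--             "title": "Введение",
--             "content": "Обзор темы; Цели презентации; Контекст",
--             "slide_type": "title"
--         },
--         {
--             "title": "Проблематика",
--             "content": "Основные вызовы; Актуальные проблемы; Почему это важно",
--             "slide_type": "bullet"
--         },
--         {
--             "title": "Анализ",
--             "content": "Текущая ситуация; Данные; Сравнение подходов",
--             "slide_type": "comparison"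
--         },
--         {
--             "title": "Решение",
--             "content": "Предлагаемый подход; Преимущества; Практическая ценность",
--             "slide_type": "image_right"
--         },
--         {
--             "title": "Результаты",
--             "content": "Ожидаемый эффект; Метрики успеха; Бизнес-ценность",
--             "slide_type": "big_number"
--         },
--         {
--             "title": "Заключение",
--             "content": "Выводы; Следующие шаги; Рекомендации",
--             "slide_type": "summary"
--         }
--     ]
--
--     slides = []
--
--     for i in range(slides_count):
--         template = templates[min(i, len(templates) - 1)]
--
--         slides.append({
--             "title": template["title"],
--             "content": template["content"],
--             "slide_type": template["slide_type"]
--         })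
--
--     return slides
-- ===== SOURCE B (Python) =====
-- def get_fallback_slides(prompt: str, slides_count: int) -> list:
--     """
--     Fallback если LLM недоступен
--     """
--
--     templates = [
--         {
--             "title": "Введение",
--             "content": "Обзор темы; Цели презентации; Контекст",
--             "slide_type": "title"
--         },
--         {
--             "title": "Проблематика",
--             "content": "Основные вызовы; Актуальные проблемы; Почему это важно",
--             "slide_type": "bullet"
--         },
--         {
--             "title": "Анализ",
--             "content": "Текущая ситуация; Данные; Сравнение подходов",
--             "slide_type": "comparison"
--         },
--         {
--             "title": "Решение",
--             "content": "Предлагаемый подход; Преимущества; Практическая ценность",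
--             "slide_type": "image_right"
--         },
--         {
--             "title": "Результаты",
--             "content": "Ожидаемый эффект; Метрики успеха; Бизнес-ценность",
--             "slide_type": "big_number"
--         },
--         {
--             "title": "Заключение",
--             "content": "Выводы; Следующие шаги; Рекомендации",
--             "slide_type": "summary"
--         }
--     ]
--
--     def row(t):
--         return {
--             "title": t["title"],
--             "content": t["content"],
--             "slide_type": t["slide_type"]
--         }
--
--     def build(ts, k):
--         # recursion on the template list itself: consume one template per slide
--         # while more than one remains, then the last template fills the rest
--         if k <= 0:
--             return []
--         if len(ts) > 1:
--             return [row(ts[0])] + build(ts[1:], k - 1)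
--         return [row(ts[0])] * k
--
--     return build(templates, slides_count)
-- ===== Notes on version B (the rewrite author's own statement) =====
-- stated objective: alternative
-- what changed: Replaces the range(n) loop with a per-iteration min() index clamp by structural recursion over the template list itself: each recursive call consumes one template and one slide, and when a single template remains it fills the rest by list multiplication.
import Mathlib
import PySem

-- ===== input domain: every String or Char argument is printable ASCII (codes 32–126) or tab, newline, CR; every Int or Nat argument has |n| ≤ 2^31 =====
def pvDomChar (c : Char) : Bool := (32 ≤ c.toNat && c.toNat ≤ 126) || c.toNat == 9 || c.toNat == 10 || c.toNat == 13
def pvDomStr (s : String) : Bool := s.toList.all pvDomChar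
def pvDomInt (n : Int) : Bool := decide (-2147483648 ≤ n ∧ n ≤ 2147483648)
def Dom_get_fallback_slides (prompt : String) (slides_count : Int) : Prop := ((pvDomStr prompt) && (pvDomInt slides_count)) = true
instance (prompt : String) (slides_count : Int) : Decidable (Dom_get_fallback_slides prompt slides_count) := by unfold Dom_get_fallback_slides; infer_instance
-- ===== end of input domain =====

-- B replaces A's clamped range(n) index loop by structural recursion on the template list (objective: alternative).

-- ===== PORT A =====
def pvTplA : List (PySem.Dict String String) := [
  PySem.Dict.mk [("title", "Введение"), ("content", "Обзор темы; Цели презентации; Контекст"), ("slide_type", "title")],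
  PySem.Dict.mk [("title", "Проблематика"), ("content", "Основные вызовы; Актуальные проблемы; Почему это важно"), ("slide_type", "bullet")],
  PySem.Dict.mk [("title", "Анализ"), ("content", "Текущая ситуация; Данные; Сравнение подходов"), ("slide_type", "comparison")],
  PySem.Dict.mk [("title", "Решение"), ("content", "Предлагаемый подход; Преимущества; Практическая ценность"), ("slide_type", "image_right")],
  PySem.Dict.mk [("title", "Результаты"), ("content", "Ожидаемый эффект; Метрики успеха; Бизнес-ценность"), ("slide_type", "big_number")],
  PySem.Dict.mk [("title", "Заключение"), ("content", "Выводы; Следующие шаги; Рекомендации"), ("slide_type", "summary")]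
]

def get_fallback_slides (prompt : String) (slides_count : Int) : List (List (String × String)) :=
  (PySem.List.pyRange 0 slides_count 1).foldl
    (fun slides i =>
      let template := PySem.List.pyGetD pvTplA (min i (PySem.List.len pvTplA - 1)) (PySem.Dict.mk [])
      slides ++ [[("title", template.getD "title" ""),
                  ("content", template.getD "content" ""),
                  ("slide_type", template.getD "slide_type" "")]])
    []

-- ===== PORT B =====
def pvTplB : List (PySem.Dict String String) := [
  PySem.Dict.mk [("title", "Введение"), ("content", "Обзор темы; Цели презентации; Контекст"), ("slide_type", "title")],
  PySem.Dict.mk [("title", "Проблематика"), ("content", "Основные вызовы; Актуальные проблемы; Почему это важно"), ("slide_type", "bullet")],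
  PySem.Dict.mk [("title", "Анализ"), ("content", "Текущая ситуация; Данные; Сравнение подходов"), ("slide_type", "comparison")],
  PySem.Dict.mk [("title", "Решение"), ("content", "Предлагаемый подход; Преимущества; Практическая ценность"), ("slide_type", "image_right")],
  PySem.Dict.mk [("title", "Результаты"), ("content", "Ожидаемый эффект; Метрики успеха; Бизнес-ценность"), ("slide_type", "big_number")],
  PySem.Dict.mk [("title", "Заключение"), ("content", "Выводы; Следующие шаги; Рекомендации"), ("slide_type", "summary")]
]

def pvRowB (t : PySem.Dict String String) : List (String × String) :=
  [("title", t.getD "title" ""), ("content", t.getD "content" ""), ("slide_type", t.getD "slide_type" "")]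

-- structural recursion on the template list, one slide per consumed template;
-- a single remaining template fills the rest (Python's `[row(ts[0])] * k`)
def pvBuild : List (PySem.Dict String String) → Int → List (List (String × String))
  | ts, k =>
    if k ≤ 0 then []
    else
      match ts with
      | t :: rest₀ :: rest => pvRowB t :: pvBuild (rest₀ :: rest) (k - 1)
      | [t] => List.replicate k.toNat (pvRowB t)
      | [] => []   -- unreachable: pvBuild is only applied to the non-empty template list

def get_fallback_slides_alt (prompt : String) (slides_count : Int) : List (List (String × String)) :=
  pvBuild pvTplB slides_count

-- ===== PRECONDITION & SPEC =====
def Spec_get_fallback_slides (prompt : String) (slides_count : Int) (out : List (List (String × String))) : Prop := out = get_fallback_slides_alt prompt slides_count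
instance (prompt : String) (slides_count : Int) (out : List (List (String × String))) : Decidable (Spec_get_fallback_slides prompt slides_count out) := by unfold Spec_get_fallback_slides; infer_instance

-- ===== CLAIM (what is proved, stated in full; the proofs are below) =====
def Claim_equal_get_fallback_slides : Prop := ∀ (prompt : String) (slides_count : Int), Dom_get_fallback_slides prompt slides_count → Spec_get_fallback_slides prompt slides_count (get_fallback_slides prompt slides_count)

-- ===== LEMMAS AND PROOFS =====

def pvGA (i : Int) : List (String × String) :=
  let template := PySem.List.pyGetD pvTplA (min i (PySem.List.len pvTplA - 1)) (PySem.Dict.mk [])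
  [("title", template.getD "title" ""),
   ("content", template.getD "content" ""),
   ("slide_type", template.getD "slide_type" "")]

def pvLastRow : List (String × String) :=
  pvRowB (PySem.Dict.mk [("title", "Заключение"), ("content", "Выводы; Следующие шаги; Рекомендации"), ("slide_type", "summary")])

theorem pvGA_large (n : Nat) (h : 6 ≤ n) : pvGA (n : Int) = pvLastRow := by
  have hmin : min ((n : Int)) (PySem.List.len pvTplA - 1) = 5 := by
    simp [pvTplA, PySem.List.len]
    omega
  unfold pvGA
  rw [hmin]
  rfl

theorem pv_core (n : Nat) :
    (List.range n).map (fun k : Nat => pvGA (k : Int)) =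
      (pvTplB.take n).map pvRowB ++ List.replicate (n - 6) pvLastRow := by
  induction n with
  | zero => rfl
  | succ n ih =>
    rw [List.range_succ, List.map_append, ih]
    by_cases h : n < 6
    · interval_cases n <;> rfl
    · replace h : 6 ≤ n := by omega
      have hlen : pvTplB.length ≤ n := by simp [pvTplB]; omega
      rw [List.take_of_length_le hlen, List.take_of_length_le (by omega),
          show n + 1 - 6 = (n - 6) + 1 by omega, List.replicate_succ']
      simp [pvGA_large n h]

theorem pvBuild_cons (t u : PySem.Dict String String) (rest : List (PySem.Dict String String))
    (k : Int) (h : 0 < k) :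
    pvBuild (t :: u :: rest) k = pvRowB t :: pvBuild (u :: rest) (k - 1) := by
  rw [pvBuild]
  simp [show ¬ k ≤ 0 by omega]

theorem pvBuild_single (t : PySem.Dict String String) (k : Int) :
    pvBuild [t] k = List.replicate k.toNat (pvRowB t) := by
  rw [pvBuild]
  split_ifs with h
  · simp [Int.toNat_of_nonpos h]
  · rfl

theorem pvBuild_tplB (n : Nat) :
    pvBuild pvTplB (n : Int) =
      (pvTplB.take n).map pvRowB ++ List.replicate (n - 6) pvLastRow := by
  by_cases h : n < 6
  · interval_cases n <;> rfl
  · replace h : 6 ≤ n := by omega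
    have h5 : ∀ m : Nat, pvBuild pvTplB ((m : Int) + 5) =
        (pvTplB.take 5).map pvRowB ++
          pvBuild [PySem.Dict.mk [("title", "Заключение"), ("content", "Выводы; Следующие шаги; Рекомендации"), ("slide_type", "summary")]] (m : Int) := by
      intro m
      unfold pvTplB
      rw [pvBuild_cons _ _ _ _ (by positivity), pvBuild_cons _ _ _ _ (by omega),
          pvBuild_cons _ _ _ _ (by omega), pvBuild_cons _ _ _ _ (by omega),
          pvBuild_cons _ _ _ _ (by omega)]
      rw [show ((m : Int) + 5 - 1 - 1 - 1 - 1 - 1) = (m : Int) by ring]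
      rfl
    have hcast : ((n : Nat) : Int) = ((n - 5 : Nat) : Int) + 5 := by omega
    rw [hcast, h5 (n - 5), pvBuild_single]
    have ht : ((n - 5 : Nat) : Int).toNat = n - 5 := by omega
    rw [ht, List.take_of_length_le (show pvTplB.length ≤ n by simp [pvTplB]; omega)]
    rw [show n - 5 = (n - 6) + 1 by omega, List.replicate_succ]
    rfl

theorem pv_main (n : Nat) :
    get_fallback_slides "" (n : Int) = get_fallback_slides_alt "" (n : Int) := by
  have hA : get_fallback_slides "" (n : Int) =
      (List.range n).map (fun k : Nat => pvGA (k : Int)) := by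
    show (PySem.List.pyRange 0 (n : Int) 1).foldl (fun slides i => slides ++ [pvGA i]) [] = _
    rw [PySem.List.foldl_append_singleton_eq_map, PySem.List.pyRange_zero_nat, List.map_map]
    rfl
  rw [hA, pv_core n]
  show _ = pvBuild pvTplB (n : Int)
  rw [pvBuild_tplB n]

theorem pv_prompt_irrel_A (p : String) (sc : Int) :
    get_fallback_slides p sc = get_fallback_slides "" sc := rfl

theorem pv_prompt_irrel_B (p : String) (sc : Int) :
    get_fallback_slides_alt p sc = get_fallback_slides_alt "" sc := rfl

-- ===== VERDICT (by name: the statement is the Claim_ definition above) =====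
theorem get_fallback_slides_spec : Claim_equal_get_fallback_slides := by
  intro prompt sc _
  unfold Spec_get_fallback_slides
  rw [pv_prompt_irrel_A, pv_prompt_irrel_B]
  by_cases h : 0 ≤ sc
  · obtain ⟨n, rfl⟩ := Int.eq_ofNat_of_zero_le h
    exact pv_main n
  · replace h : sc < 0 := by omega
    rw [show get_fallback_slides "" sc = [] from by
        simp [get_fallback_slides, PySem.List.pyRange_one_eq_nil (by omega : sc ≤ 0)]]
    show ([] : List (List (String × String))) = pvBuild pvTplB sc
    rw [pvBuild.eq_def]
    simp [show sc ≤ 0 by omega]
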